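-- pv_equiv track=rewrite | github.com/balwantsinghmnit/selected_topics_in_cryptography-STC-Lab | lab2/lab2.py | checkfour
-- ===== SOURCE A (Python) =====
-- import string
--
-- lower = string.ascii_lowercase
--
-- four = ["that", "with", "have", "this", "will", "your", "from", "they", "know", "want", "been", "good", "much", "some", "time"]
--
-- def con(n):
-- 	if n<0:
-- 		return(26+n)
-- 	else:
-- 		return n
--
-- def checkfour(s):
-- 	i1 = lower.index(s[0])
-- 	i2 = lower.index(s[1])
-- 	i3 = lower.index(s[2])
-- 	i4 = lower.index(s[3])
-- 	for i in range(len(four)):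
-- 		d1 = lower.index(four[i][0])
-- 		d2 = lower.index(four[i][1])
-- 		d3 = lower.index(four[i][2])
-- 		d4 = lower.index(four[i][3])
-- 		if con(d1-d2)==con(i1-i2) and con(d2-d3)==con(i2-i3) and con(d3-d4)==con(i3-i4):
-- 			return(max(d1-i1,i1-d1))
-- 	return(0)
-- ===== SOURCE B (Python) =====
-- import string
--
-- lower = string.ascii_lowercase
--
-- four = ["that", "with", "have", "this", "will", "your", "from", "they", "know", "want", "been", "good", "much", "some", "time"]
--
-- # Precomputed once: letter-gap pattern -> first-letter index of the FIRST word with that pattern.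
-- _table = {}
-- for _w in four:
--     _d = [lower.index(_c) for _c in _w]
--     _table.setdefault(((_d[0] - _d[1]) % 26, (_d[1] - _d[2]) % 26, (_d[2] - _d[3]) % 26), _d[0])
--
-- def checkfour(s):
--     i1 = lower.index(s[0])
--     i2 = lower.index(s[1])
--     i3 = lower.index(s[2])
--     i4 = lower.index(s[3])
--     d1 = _table.get(((i1 - i2) % 26, (i2 - i3) % 26, (i3 - i4) % 26))
--     if d1 is None:
--         return 0
--     return abs(d1 - i1)
-- ===== Notes on version B (the rewrite author's own statement) =====
-- stated objective: simpler
-- what changed: The per-call scan over the 15-word list (recomputing all four letter indices of every word) is replaced by a module-level dict, built once, that maps each word's letter-gap pattern to its first-letter index; checkfour now does a single table lookup on the input's pattern.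
import Mathlib
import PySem

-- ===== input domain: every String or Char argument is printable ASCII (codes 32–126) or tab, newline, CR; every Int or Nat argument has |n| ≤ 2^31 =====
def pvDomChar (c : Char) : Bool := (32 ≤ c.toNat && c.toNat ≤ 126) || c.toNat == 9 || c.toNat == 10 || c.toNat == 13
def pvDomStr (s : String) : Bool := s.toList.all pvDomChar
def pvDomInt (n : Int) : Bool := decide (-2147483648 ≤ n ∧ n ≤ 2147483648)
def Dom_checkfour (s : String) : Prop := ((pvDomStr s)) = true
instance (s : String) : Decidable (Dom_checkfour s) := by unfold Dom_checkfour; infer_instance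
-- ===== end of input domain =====

-- B replaces A's per-call scan over the 15-word list by a dict, built once at module level,
-- from each word's letter-gap pattern to its first-letter index; checkfour is one table lookup.

-- ===== PORT A =====
def lowerA : List Char := "abcdefghijklmnopqrstuvwxyz".toList   -- lower = string.ascii_lowercase

-- lower.index(c) for a one-character needle: first position of c in lower; none = ValueError
def lowerIdxA (c : Char) : Option Int :=
  (PySem.List.index? lowerA c).map (fun n => (n : Int))

def fourA : List String :=
  ["that", "with", "have", "this", "will", "your", "from", "they", "know", "want",
   "been", "good", "much", "some", "time"]

def con (n : Int) : Int := if n < 0 then 26 + n else n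

-- the `for i in range(len(four))` loop with its early return, as structural recursion
def loopA : List String → Int → Int → Int → Int → Int
  | [], _, _, _, _ => 0
  | w :: ws, i1, i2, i3, i4 =>
    -- fourA's entries are literal lowercase 4-letter words, so pyGet?/lowerIdx never fail on them
    let d1 := (lowerIdxA ((PySem.Str.pyGet? w 0).getD ' ')).getD 0
    let d2 := (lowerIdxA ((PySem.Str.pyGet? w 1).getD ' ')).getD 0
    let d3 := (lowerIdxA ((PySem.Str.pyGet? w 2).getD ' ')).getD 0
    let d4 := (lowerIdxA ((PySem.Str.pyGet? w 3).getD ' ')).getD 0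
    if con (d1 - d2) = con (i1 - i2) ∧ con (d2 - d3) = con (i2 - i3) ∧
       con (d3 - d4) = con (i3 - i4) then
      max (d1 - i1) (i1 - d1)
    else
      loopA ws i1 i2 i3 i4

def checkfour (s : String) : Int :=
  match PySem.Str.pyGet? s 0, PySem.Str.pyGet? s 1, PySem.Str.pyGet? s 2, PySem.Str.pyGet? s 3 with
  | some c1, some c2, some c3, some c4 =>
    match lowerIdxA c1, lowerIdxA c2, lowerIdxA c3, lowerIdxA c4 with
    | some i1, some i2, some i3, some i4 => loopA fourA i1 i2 i3 i4
    | _, _, _, _ => 0   -- ValueError in Python: excluded by Pre_checkfour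
  | _, _, _, _ => 0     -- IndexError in Python: excluded by Pre_checkfour

-- ===== PORT B =====
def lowerB : List Char := "abcdefghijklmnopqrstuvwxyz".toList   -- lower = string.ascii_lowercase

-- lower.index(c) for a one-character needle (same Python expression as in A's module)
def lowerIdxB (c : Char) : Option Int :=
  (PySem.List.index? lowerB c).map (fun n => (n : Int))

def fourB : List String :=
  ["that", "with", "have", "this", "will", "your", "from", "they", "know", "want",
   "been", "good", "much", "some", "time"]

-- module-level table build: pattern -> first-letter index, first occurrence kept (setdefault)
def tableB : PySem.Dict (Int × Int × Int) Int :=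
  fourB.foldl
    (fun t w =>
      let d := w.toList.map (fun c => (lowerIdxB c).getD 0)
      t.setdefault (PySem.Int.mod (d.getD 0 0 - d.getD 1 0) 26,
                    PySem.Int.mod (d.getD 1 0 - d.getD 2 0) 26,
                    PySem.Int.mod (d.getD 2 0 - d.getD 3 0) 26)
        (d.getD 0 0))
    PySem.Dict.empty

-- _table.get(key) then `if d1 is None: return 0; return abs(d1 - i1)`
def altCore (i1 i2 i3 i4 : Int) : Int :=
  match tableB.get? (PySem.Int.mod (i1 - i2) 26, PySem.Int.mod (i2 - i3) 26,
                     PySem.Int.mod (i3 - i4) 26) with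
  | none => 0
  | some d1 => |d1 - i1|

def checkfour_alt (s : String) : Int :=
  -- the four `lower.index(s[k])` statements, in order; none = the exception Pre_ excludes
  match PySem.Str.pyGet? s 0 with
  | none => 0
  | some c1 =>
  match lowerIdxB c1 with
  | none => 0
  | some i1 =>
  match PySem.Str.pyGet? s 1 with
  | none => 0
  | some c2 =>
  match lowerIdxB c2 with
  | none => 0
  | some i2 =>
  match PySem.Str.pyGet? s 2 with
  | none => 0
  | some c3 =>
  match lowerIdxB c3 with
  | none => 0
  | some i3 =>
  match PySem.Str.pyGet? s 3 with
  | none => 0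
  | some c4 =>
  match lowerIdxB c4 with
  | none => 0
  | some i4 => altCore i1 i2 i3 i4

-- ===== PRECONDITION & SPEC =====
-- reference alphabet for the precondition (the same 26 letters the Python module's `lower` holds)
def lowerChars : List Char := "abcdefghijklmnopqrstuvwxyz".toList

-- Python A raises IndexError on strings shorter than 4 characters and ValueError when one of
-- the first four characters is not a lowercase ASCII letter; exactly those inputs are excluded.
def Pre_checkfour (s : String) : Prop :=
  4 ≤ s.toList.length ∧ ((s.toList.take 4).all (fun c => lowerChars.contains c)) = true

instance (s : String) : Decidable (Pre_checkfour s) := by unfold Pre_checkfour; infer_instance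

def pvWitness_checkfour : String := "whis"

def Spec_checkfour (s : String) (out : Int) : Prop := out = checkfour_alt s
instance (s : String) (out : Int) : Decidable (Spec_checkfour s out) := by unfold Spec_checkfour; infer_instance

-- ===== CLAIM (what is proved, stated in full; the proofs are below) =====
def Claim_equal_checkfour : Prop := ∀ (s : String), Dom_checkfour s → Pre_checkfour s → Spec_checkfour s (checkfour s)

-- ===== LEMMAS AND PROOFS =====

theorem lowerIdxA_bounds {c : Char} {i : Int} (h : lowerIdxA c = some i) : 0 ≤ i ∧ i < 26 := by
  unfold lowerIdxA at h
  rcases hk : PySem.List.index? lowerA c with _ | k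
  · rw [hk] at h; simp at h
  · rw [hk] at h
    obtain ⟨hlt, -, -⟩ := PySem.List.getElem_of_index?_eq_some hk
    simp at h
    constructor
    · omega
    · have : k < 26 := by simpa [lowerA] using hlt
      omega

theorem lowerIdxA_isSome {c : Char} (h : c ∈ lowerA) : (lowerIdxA c).isSome := by
  unfold lowerIdxA
  rcases hk : PySem.List.index? lowerA c with _ | k
  · exact absurd h ((PySem.List.index?_eq_none_iff lowerA c).1 hk)
  · simp

theorem con_eq_mod {n : Int} (h1 : -26 < n) (h2 : n < 26) :
    con n = PySem.Int.mod n 26 := by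
  unfold con
  rcases lt_or_ge n 0 with h | h
  · rw [if_pos h]
    have := PySem.Int.floordiv_mul_add_mod n 26
    have hd : PySem.Int.floordiv n 26 = -1 :=
      (PySem.Int.floordiv_eq_iff_of_pos (by omega)).2 ⟨by omega, by omega⟩
    omega
  · rw [if_neg (by omega)]
    have := PySem.Int.floordiv_mul_add_mod n 26
    have hd : PySem.Int.floordiv n 26 = 0 :=
      (PySem.Int.floordiv_eq_iff_of_pos (by omega)).2 ⟨by omega, by omega⟩
    omega
theorem max_abs (d i : Int) : max (d - i) (i - d) = |d - i| := by
  rw [abs_eq_max_neg]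
  congr 1
  ring
set_option maxHeartbeats 2000000 in
theorem core_eq (i1 i2 i3 i4 : Int)
    (h1a : 0 ≤ i1) (h1b : i1 < 26) (h2a : 0 ≤ i2) (h2b : i2 < 26)
    (h3a : 0 ≤ i3) (h3b : i3 < 26) (h4a : 0 ≤ i4) (h4b : i4 < 26) :
    loopA fourA i1 i2 i3 i4 = altCore i1 i2 i3 i4 := by
  have e12 : con (i1 - i2) = PySem.Int.mod (i1 - i2) 26 := con_eq_mod (by omega) (by omega)
  have e23 : con (i2 - i3) = PySem.Int.mod (i2 - i3) 26 := con_eq_mod (by omega) (by omega)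
  have e34 : con (i3 - i4) = PySem.Int.mod (i3 - i4) 26 := con_eq_mod (by omega) (by omega)
  have htab : tableB = PySem.Dict.mk [((12, 7, 7), 19), ((14, 15, 12), 22), ((7, 5, 17), 7), ((12, 25, 16), 19), ((14, 23, 0), 22), ((10, 20, 3), 24), ((14, 3, 2), 5), ((12, 3, 6), 19), ((23, 25, 18), 10), ((22, 13, 20), 22), ((23, 0, 17), 1), ((18, 0, 11), 6), ((18, 18, 21), 12), ((4, 2, 8), 18), ((11, 22, 8), 19)] := by decide
  have ed0_0 : (lowerIdxA ((PySem.Str.pyGet? "that" 0).getD ' ')).getD 0 = 19 := by decide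
  have ed0_1 : (lowerIdxA ((PySem.Str.pyGet? "that" 1).getD ' ')).getD 0 = 7 := by decide
  have ed0_2 : (lowerIdxA ((PySem.Str.pyGet? "that" 2).getD ' ')).getD 0 = 0 := by decide
  have ed0_3 : (lowerIdxA ((PySem.Str.pyGet? "that" 3).getD ' ')).getD 0 = 19 := by decide
  have ed1_0 : (lowerIdxA ((PySem.Str.pyGet? "with" 0).getD ' ')).getD 0 = 22 := by decide
  have ed1_1 : (lowerIdxA ((PySem.Str.pyGet? "with" 1).getD ' ')).getD 0 = 8 := by decide
  have ed1_2 : (lowerIdxA ((PySem.Str.pyGet? "with" 2).getD ' ')).getD 0 = 19 := by decide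
  have ed1_3 : (lowerIdxA ((PySem.Str.pyGet? "with" 3).getD ' ')).getD 0 = 7 := by decide
  have ed2_0 : (lowerIdxA ((PySem.Str.pyGet? "have" 0).getD ' ')).getD 0 = 7 := by decide
  have ed2_1 : (lowerIdxA ((PySem.Str.pyGet? "have" 1).getD ' ')).getD 0 = 0 := by decide
  have ed2_2 : (lowerIdxA ((PySem.Str.pyGet? "have" 2).getD ' ')).getD 0 = 21 := by decide
  have ed2_3 : (lowerIdxA ((PySem.Str.pyGet? "have" 3).getD ' ')).getD 0 = 4 := by decide
  have ed3_0 : (lowerIdxA ((PySem.Str.pyGet? "this" 0).getD ' ')).getD 0 = 19 := by decide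
  have ed3_1 : (lowerIdxA ((PySem.Str.pyGet? "this" 1).getD ' ')).getD 0 = 7 := by decide
  have ed3_2 : (lowerIdxA ((PySem.Str.pyGet? "this" 2).getD ' ')).getD 0 = 8 := by decide
  have ed3_3 : (lowerIdxA ((PySem.Str.pyGet? "this" 3).getD ' ')).getD 0 = 18 := by decide
  have ed4_0 : (lowerIdxA ((PySem.Str.pyGet? "will" 0).getD ' ')).getD 0 = 22 := by decide
  have ed4_1 : (lowerIdxA ((PySem.Str.pyGet? "will" 1).getD ' ')).getD 0 = 8 := by decide
  have ed4_2 : (lowerIdxA ((PySem.Str.pyGet? "will" 2).getD ' ')).getD 0 = 11 := by decide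
  have ed4_3 : (lowerIdxA ((PySem.Str.pyGet? "will" 3).getD ' ')).getD 0 = 11 := by decide
  have ed5_0 : (lowerIdxA ((PySem.Str.pyGet? "your" 0).getD ' ')).getD 0 = 24 := by decide
  have ed5_1 : (lowerIdxA ((PySem.Str.pyGet? "your" 1).getD ' ')).getD 0 = 14 := by decide
  have ed5_2 : (lowerIdxA ((PySem.Str.pyGet? "your" 2).getD ' ')).getD 0 = 20 := by decide
  have ed5_3 : (lowerIdxA ((PySem.Str.pyGet? "your" 3).getD ' ')).getD 0 = 17 := by decide
  have ed6_0 : (lowerIdxA ((PySem.Str.pyGet? "from" 0).getD ' ')).getD 0 = 5 := by decide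
  have ed6_1 : (lowerIdxA ((PySem.Str.pyGet? "from" 1).getD ' ')).getD 0 = 17 := by decide
  have ed6_2 : (lowerIdxA ((PySem.Str.pyGet? "from" 2).getD ' ')).getD 0 = 14 := by decide
  have ed6_3 : (lowerIdxA ((PySem.Str.pyGet? "from" 3).getD ' ')).getD 0 = 12 := by decide
  have ed7_0 : (lowerIdxA ((PySem.Str.pyGet? "they" 0).getD ' ')).getD 0 = 19 := by decide
  have ed7_1 : (lowerIdxA ((PySem.Str.pyGet? "they" 1).getD ' ')).getD 0 = 7 := by decide
  have ed7_2 : (lowerIdxA ((PySem.Str.pyGet? "they" 2).getD ' ')).getD 0 = 4 := by decide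
  have ed7_3 : (lowerIdxA ((PySem.Str.pyGet? "they" 3).getD ' ')).getD 0 = 24 := by decide
  have ed8_0 : (lowerIdxA ((PySem.Str.pyGet? "know" 0).getD ' ')).getD 0 = 10 := by decide
  have ed8_1 : (lowerIdxA ((PySem.Str.pyGet? "know" 1).getD ' ')).getD 0 = 13 := by decide
  have ed8_2 : (lowerIdxA ((PySem.Str.pyGet? "know" 2).getD ' ')).getD 0 = 14 := by decide
  have ed8_3 : (lowerIdxA ((PySem.Str.pyGet? "know" 3).getD ' ')).getD 0 = 22 := by decide
  have ed9_0 : (lowerIdxA ((PySem.Str.pyGet? "want" 0).getD ' ')).getD 0 = 22 := by decide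
  have ed9_1 : (lowerIdxA ((PySem.Str.pyGet? "want" 1).getD ' ')).getD 0 = 0 := by decide
  have ed9_2 : (lowerIdxA ((PySem.Str.pyGet? "want" 2).getD ' ')).getD 0 = 13 := by decide
  have ed9_3 : (lowerIdxA ((PySem.Str.pyGet? "want" 3).getD ' ')).getD 0 = 19 := by decide
  have ed10_0 : (lowerIdxA ((PySem.Str.pyGet? "been" 0).getD ' ')).getD 0 = 1 := by decide
  have ed10_1 : (lowerIdxA ((PySem.Str.pyGet? "been" 1).getD ' ')).getD 0 = 4 := by decide
  have ed10_2 : (lowerIdxA ((PySem.Str.pyGet? "been" 2).getD ' ')).getD 0 = 4 := by decide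
  have ed10_3 : (lowerIdxA ((PySem.Str.pyGet? "been" 3).getD ' ')).getD 0 = 13 := by decide
  have ed11_0 : (lowerIdxA ((PySem.Str.pyGet? "good" 0).getD ' ')).getD 0 = 6 := by decide
  have ed11_1 : (lowerIdxA ((PySem.Str.pyGet? "good" 1).getD ' ')).getD 0 = 14 := by decide
  have ed11_2 : (lowerIdxA ((PySem.Str.pyGet? "good" 2).getD ' ')).getD 0 = 14 := by decide
  have ed11_3 : (lowerIdxA ((PySem.Str.pyGet? "good" 3).getD ' ')).getD 0 = 3 := by decide
  have ed12_0 : (lowerIdxA ((PySem.Str.pyGet? "much" 0).getD ' ')).getD 0 = 12 := by decide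
  have ed12_1 : (lowerIdxA ((PySem.Str.pyGet? "much" 1).getD ' ')).getD 0 = 20 := by decide
  have ed12_2 : (lowerIdxA ((PySem.Str.pyGet? "much" 2).getD ' ')).getD 0 = 2 := by decide
  have ed12_3 : (lowerIdxA ((PySem.Str.pyGet? "much" 3).getD ' ')).getD 0 = 7 := by decide
  have ed13_0 : (lowerIdxA ((PySem.Str.pyGet? "some" 0).getD ' ')).getD 0 = 18 := by decide
  have ed13_1 : (lowerIdxA ((PySem.Str.pyGet? "some" 1).getD ' ')).getD 0 = 14 := by decide
  have ed13_2 : (lowerIdxA ((PySem.Str.pyGet? "some" 2).getD ' ')).getD 0 = 12 := by decide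
  have ed13_3 : (lowerIdxA ((PySem.Str.pyGet? "some" 3).getD ' ')).getD 0 = 4 := by decide
  have ed14_0 : (lowerIdxA ((PySem.Str.pyGet? "time" 0).getD ' ')).getD 0 = 19 := by decide
  have ed14_1 : (lowerIdxA ((PySem.Str.pyGet? "time" 1).getD ' ')).getD 0 = 8 := by decide
  have ed14_2 : (lowerIdxA ((PySem.Str.pyGet? "time" 2).getD ' ')).getD 0 = 12 := by decide
  have ed14_3 : (lowerIdxA ((PySem.Str.pyGet? "time" 3).getD ' ')).getD 0 = 4 := by decide
  have ec0_0 : con (19 - 7) = 12 := by decide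
  have ec0_1 : con (7 - 0) = 7 := by decide
  have ec0_2 : con (0 - 19) = 7 := by decide
  have ec1_0 : con (22 - 8) = 14 := by decide
  have ec1_1 : con (8 - 19) = 15 := by decide
  have ec2_1 : con (0 - 21) = 5 := by decide
  have ec2_2 : con (21 - 4) = 17 := by decide
  have ec3_1 : con (7 - 8) = 25 := by decide
  have ec3_2 : con (8 - 18) = 16 := by decide
  have ec4_1 : con (8 - 11) = 23 := by decide
  have ec4_2 : con (11 - 11) = 0 := by decide
  have ec5_0 : con (24 - 14) = 10 := by decide
  have ec5_1 : con (14 - 20) = 20 := by decide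
  have ec5_2 : con (20 - 17) = 3 := by decide
  have ec6_0 : con (5 - 17) = 14 := by decide
  have ec6_1 : con (17 - 14) = 3 := by decide
  have ec6_2 : con (14 - 12) = 2 := by decide
  have ec7_1 : con (7 - 4) = 3 := by decide
  have ec7_2 : con (4 - 24) = 6 := by decide
  have ec8_0 : con (10 - 13) = 23 := by decide
  have ec8_1 : con (13 - 14) = 25 := by decide
  have ec8_2 : con (14 - 22) = 18 := by decide
  have ec9_0 : con (22 - 0) = 22 := by decide
  have ec9_1 : con (0 - 13) = 13 := by decide
  have ec9_2 : con (13 - 19) = 20 := by decide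
  have ec10_0 : con (1 - 4) = 23 := by decide
  have ec10_1 : con (4 - 4) = 0 := by decide
  have ec10_2 : con (4 - 13) = 17 := by decide
  have ec11_0 : con (6 - 14) = 18 := by decide
  have ec11_1 : con (14 - 14) = 0 := by decide
  have ec11_2 : con (14 - 3) = 11 := by decide
  have ec12_0 : con (12 - 20) = 18 := by decide
  have ec12_1 : con (20 - 2) = 18 := by decide
  have ec12_2 : con (2 - 7) = 21 := by decide
  have ec13_0 : con (18 - 14) = 4 := by decide
  have ec13_2 : con (12 - 4) = 8 := by decide
  have ec14_0 : con (19 - 8) = 11 := by decide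
  have ec14_1 : con (8 - 12) = 22 := by decide
  simp only [fourA, loopA, ed0_0, ed0_1, ed0_2, ed0_3, ed1_0, ed1_1, ed1_2, ed1_3, ed2_0, ed2_1, ed2_2, ed2_3, ed3_0, ed3_1, ed3_2, ed3_3, ed4_0, ed4_1, ed4_2, ed4_3, ed5_0, ed5_1, ed5_2, ed5_3, ed6_0, ed6_1, ed6_2, ed6_3, ed7_0, ed7_1, ed7_2, ed7_3, ed8_0, ed8_1, ed8_2, ed8_3, ed9_0, ed9_1, ed9_2, ed9_3, ed10_0, ed10_1, ed10_2, ed10_3, ed11_0, ed11_1, ed11_2, ed11_3, ed12_0, ed12_1, ed12_2, ed12_3, ed13_0, ed13_1, ed13_2, ed13_3, ed14_0, ed14_1, ed14_2, ed14_3]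
  simp only [ec0_0, ec0_1, ec0_2, ec1_0, ec1_1, ec2_1, ec2_2, ec3_1, ec3_2, ec4_1, ec4_2, ec5_0, ec5_1, ec5_2, ec6_0, ec6_1, ec6_2, ec7_1, ec7_2, ec8_0, ec8_1, ec8_2, ec9_0, ec9_1, ec9_2, ec10_0, ec10_1, ec10_2, ec11_0, ec11_1, ec11_2, ec12_0, ec12_1, ec12_2, ec13_0, ec13_2, ec14_0, ec14_1, e12, e23, e34]
  simp only [altCore]
  rw [htab]
  by_cases h0 : (12 : Int) = PySem.Int.mod (i1 - i2) 26 ∧ (7 : Int) = PySem.Int.mod (i2 - i3) 26 ∧ (7 : Int) = PySem.Int.mod (i3 - i4) 26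
  · rw [if_pos h0, PySem.Dict.get?_mk_cons,
      show (((12, 7, 7) : Int × Int × Int) == (PySem.Int.mod (i1 - i2) 26, PySem.Int.mod (i2 - i3) 26, PySem.Int.mod (i3 - i4) 26)) = true from
        beq_iff_eq.2 (by rw [← h0.1, ← h0.2.1, ← h0.2.2])]
    exact max_abs 19 i1
  rw [if_neg h0, PySem.Dict.get?_mk_cons,
      show (((12, 7, 7) : Int × Int × Int) == (PySem.Int.mod (i1 - i2) 26, PySem.Int.mod (i2 - i3) 26, PySem.Int.mod (i3 - i4) 26)) = false from
        beq_eq_false_iff_ne.2 (by intro he; rw [Prod.mk.injEq, Prod.mk.injEq] at he; exact h0 ⟨he.1, he.2.1, he.2.2⟩)]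
  by_cases h1 : (14 : Int) = PySem.Int.mod (i1 - i2) 26 ∧ (15 : Int) = PySem.Int.mod (i2 - i3) 26 ∧ (12 : Int) = PySem.Int.mod (i3 - i4) 26
  · rw [if_pos h1, PySem.Dict.get?_mk_cons,
      show (((14, 15, 12) : Int × Int × Int) == (PySem.Int.mod (i1 - i2) 26, PySem.Int.mod (i2 - i3) 26, PySem.Int.mod (i3 - i4) 26)) = true from
        beq_iff_eq.2 (by rw [← h1.1, ← h1.2.1, ← h1.2.2])]
    exact max_abs 22 i1
  rw [if_neg h1, PySem.Dict.get?_mk_cons,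
      show (((14, 15, 12) : Int × Int × Int) == (PySem.Int.mod (i1 - i2) 26, PySem.Int.mod (i2 - i3) 26, PySem.Int.mod (i3 - i4) 26)) = false from
        beq_eq_false_iff_ne.2 (by intro he; rw [Prod.mk.injEq, Prod.mk.injEq] at he; exact h1 ⟨he.1, he.2.1, he.2.2⟩)]
  by_cases h2 : (7 : Int) = PySem.Int.mod (i1 - i2) 26 ∧ (5 : Int) = PySem.Int.mod (i2 - i3) 26 ∧ (17 : Int) = PySem.Int.mod (i3 - i4) 26
  · rw [if_pos h2, PySem.Dict.get?_mk_cons,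
      show (((7, 5, 17) : Int × Int × Int) == (PySem.Int.mod (i1 - i2) 26, PySem.Int.mod (i2 - i3) 26, PySem.Int.mod (i3 - i4) 26)) = true from
        beq_iff_eq.2 (by rw [← h2.1, ← h2.2.1, ← h2.2.2])]
    exact max_abs 7 i1
  rw [if_neg h2, PySem.Dict.get?_mk_cons,
      show (((7, 5, 17) : Int × Int × Int) == (PySem.Int.mod (i1 - i2) 26, PySem.Int.mod (i2 - i3) 26, PySem.Int.mod (i3 - i4) 26)) = false from
        beq_eq_false_iff_ne.2 (by intro he; rw [Prod.mk.injEq, Prod.mk.injEq] at he; exact h2 ⟨he.1, he.2.1, he.2.2⟩)]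
  by_cases h3 : (12 : Int) = PySem.Int.mod (i1 - i2) 26 ∧ (25 : Int) = PySem.Int.mod (i2 - i3) 26 ∧ (16 : Int) = PySem.Int.mod (i3 - i4) 26
  · rw [if_pos h3, PySem.Dict.get?_mk_cons,
      show (((12, 25, 16) : Int × Int × Int) == (PySem.Int.mod (i1 - i2) 26, PySem.Int.mod (i2 - i3) 26, PySem.Int.mod (i3 - i4) 26)) = true from
        beq_iff_eq.2 (by rw [← h3.1, ← h3.2.1, ← h3.2.2])]
    exact max_abs 19 i1
  rw [if_neg h3, PySem.Dict.get?_mk_cons,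
      show (((12, 25, 16) : Int × Int × Int) == (PySem.Int.mod (i1 - i2) 26, PySem.Int.mod (i2 - i3) 26, PySem.Int.mod (i3 - i4) 26)) = false from
        beq_eq_false_iff_ne.2 (by intro he; rw [Prod.mk.injEq, Prod.mk.injEq] at he; exact h3 ⟨he.1, he.2.1, he.2.2⟩)]
  by_cases h4 : (14 : Int) = PySem.Int.mod (i1 - i2) 26 ∧ (23 : Int) = PySem.Int.mod (i2 - i3) 26 ∧ (0 : Int) = PySem.Int.mod (i3 - i4) 26
  · rw [if_pos h4, PySem.Dict.get?_mk_cons,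
      show (((14, 23, 0) : Int × Int × Int) == (PySem.Int.mod (i1 - i2) 26, PySem.Int.mod (i2 - i3) 26, PySem.Int.mod (i3 - i4) 26)) = true from
        beq_iff_eq.2 (by rw [← h4.1, ← h4.2.1, ← h4.2.2])]
    exact max_abs 22 i1
  rw [if_neg h4, PySem.Dict.get?_mk_cons,
      show (((14, 23, 0) : Int × Int × Int) == (PySem.Int.mod (i1 - i2) 26, PySem.Int.mod (i2 - i3) 26, PySem.Int.mod (i3 - i4) 26)) = false from
        beq_eq_false_iff_ne.2 (by intro he; rw [Prod.mk.injEq, Prod.mk.injEq] at he; exact h4 ⟨he.1, he.2.1, he.2.2⟩)]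
  by_cases h5 : (10 : Int) = PySem.Int.mod (i1 - i2) 26 ∧ (20 : Int) = PySem.Int.mod (i2 - i3) 26 ∧ (3 : Int) = PySem.Int.mod (i3 - i4) 26
  · rw [if_pos h5, PySem.Dict.get?_mk_cons,
      show (((10, 20, 3) : Int × Int × Int) == (PySem.Int.mod (i1 - i2) 26, PySem.Int.mod (i2 - i3) 26, PySem.Int.mod (i3 - i4) 26)) = true from
        beq_iff_eq.2 (by rw [← h5.1, ← h5.2.1, ← h5.2.2])]
    exact max_abs 24 i1
  rw [if_neg h5, PySem.Dict.get?_mk_cons,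
      show (((10, 20, 3) : Int × Int × Int) == (PySem.Int.mod (i1 - i2) 26, PySem.Int.mod (i2 - i3) 26, PySem.Int.mod (i3 - i4) 26)) = false from
        beq_eq_false_iff_ne.2 (by intro he; rw [Prod.mk.injEq, Prod.mk.injEq] at he; exact h5 ⟨he.1, he.2.1, he.2.2⟩)]
  by_cases h6 : (14 : Int) = PySem.Int.mod (i1 - i2) 26 ∧ (3 : Int) = PySem.Int.mod (i2 - i3) 26 ∧ (2 : Int) = PySem.Int.mod (i3 - i4) 26
  · rw [if_pos h6, PySem.Dict.get?_mk_cons,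
      show (((14, 3, 2) : Int × Int × Int) == (PySem.Int.mod (i1 - i2) 26, PySem.Int.mod (i2 - i3) 26, PySem.Int.mod (i3 - i4) 26)) = true from
        beq_iff_eq.2 (by rw [← h6.1, ← h6.2.1, ← h6.2.2])]
    exact max_abs 5 i1
  rw [if_neg h6, PySem.Dict.get?_mk_cons,
      show (((14, 3, 2) : Int × Int × Int) == (PySem.Int.mod (i1 - i2) 26, PySem.Int.mod (i2 - i3) 26, PySem.Int.mod (i3 - i4) 26)) = false from
        beq_eq_false_iff_ne.2 (by intro he; rw [Prod.mk.injEq, Prod.mk.injEq] at he; exact h6 ⟨he.1, he.2.1, he.2.2⟩)]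
  by_cases h7 : (12 : Int) = PySem.Int.mod (i1 - i2) 26 ∧ (3 : Int) = PySem.Int.mod (i2 - i3) 26 ∧ (6 : Int) = PySem.Int.mod (i3 - i4) 26
  · rw [if_pos h7, PySem.Dict.get?_mk_cons,
      show (((12, 3, 6) : Int × Int × Int) == (PySem.Int.mod (i1 - i2) 26, PySem.Int.mod (i2 - i3) 26, PySem.Int.mod (i3 - i4) 26)) = true from
        beq_iff_eq.2 (by rw [← h7.1, ← h7.2.1, ← h7.2.2])]
    exact max_abs 19 i1
  rw [if_neg h7, PySem.Dict.get?_mk_cons,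
      show (((12, 3, 6) : Int × Int × Int) == (PySem.Int.mod (i1 - i2) 26, PySem.Int.mod (i2 - i3) 26, PySem.Int.mod (i3 - i4) 26)) = false from
        beq_eq_false_iff_ne.2 (by intro he; rw [Prod.mk.injEq, Prod.mk.injEq] at he; exact h7 ⟨he.1, he.2.1, he.2.2⟩)]
  by_cases h8 : (23 : Int) = PySem.Int.mod (i1 - i2) 26 ∧ (25 : Int) = PySem.Int.mod (i2 - i3) 26 ∧ (18 : Int) = PySem.Int.mod (i3 - i4) 26
  · rw [if_pos h8, PySem.Dict.get?_mk_cons,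
      show (((23, 25, 18) : Int × Int × Int) == (PySem.Int.mod (i1 - i2) 26, PySem.Int.mod (i2 - i3) 26, PySem.Int.mod (i3 - i4) 26)) = true from
        beq_iff_eq.2 (by rw [← h8.1, ← h8.2.1, ← h8.2.2])]
    exact max_abs 10 i1
  rw [if_neg h8, PySem.Dict.get?_mk_cons,
      show (((23, 25, 18) : Int × Int × Int) == (PySem.Int.mod (i1 - i2) 26, PySem.Int.mod (i2 - i3) 26, PySem.Int.mod (i3 - i4) 26)) = false from
        beq_eq_false_iff_ne.2 (by intro he; rw [Prod.mk.injEq, Prod.mk.injEq] at he; exact h8 ⟨he.1, he.2.1, he.2.2⟩)]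
  by_cases h9 : (22 : Int) = PySem.Int.mod (i1 - i2) 26 ∧ (13 : Int) = PySem.Int.mod (i2 - i3) 26 ∧ (20 : Int) = PySem.Int.mod (i3 - i4) 26
  · rw [if_pos h9, PySem.Dict.get?_mk_cons,
      show (((22, 13, 20) : Int × Int × Int) == (PySem.Int.mod (i1 - i2) 26, PySem.Int.mod (i2 - i3) 26, PySem.Int.mod (i3 - i4) 26)) = true from
        beq_iff_eq.2 (by rw [← h9.1, ← h9.2.1, ← h9.2.2])]
    exact max_abs 22 i1
  rw [if_neg h9, PySem.Dict.get?_mk_cons,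
      show (((22, 13, 20) : Int × Int × Int) == (PySem.Int.mod (i1 - i2) 26, PySem.Int.mod (i2 - i3) 26, PySem.Int.mod (i3 - i4) 26)) = false from
        beq_eq_false_iff_ne.2 (by intro he; rw [Prod.mk.injEq, Prod.mk.injEq] at he; exact h9 ⟨he.1, he.2.1, he.2.2⟩)]
  by_cases h10 : (23 : Int) = PySem.Int.mod (i1 - i2) 26 ∧ (0 : Int) = PySem.Int.mod (i2 - i3) 26 ∧ (17 : Int) = PySem.Int.mod (i3 - i4) 26
  · rw [if_pos h10, PySem.Dict.get?_mk_cons,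
      show (((23, 0, 17) : Int × Int × Int) == (PySem.Int.mod (i1 - i2) 26, PySem.Int.mod (i2 - i3) 26, PySem.Int.mod (i3 - i4) 26)) = true from
        beq_iff_eq.2 (by rw [← h10.1, ← h10.2.1, ← h10.2.2])]
    exact max_abs 1 i1
  rw [if_neg h10, PySem.Dict.get?_mk_cons,
      show (((23, 0, 17) : Int × Int × Int) == (PySem.Int.mod (i1 - i2) 26, PySem.Int.mod (i2 - i3) 26, PySem.Int.mod (i3 - i4) 26)) = false from
        beq_eq_false_iff_ne.2 (by intro he; rw [Prod.mk.injEq, Prod.mk.injEq] at he; exact h10 ⟨he.1, he.2.1, he.2.2⟩)]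
  by_cases h11 : (18 : Int) = PySem.Int.mod (i1 - i2) 26 ∧ (0 : Int) = PySem.Int.mod (i2 - i3) 26 ∧ (11 : Int) = PySem.Int.mod (i3 - i4) 26
  · rw [if_pos h11, PySem.Dict.get?_mk_cons,
      show (((18, 0, 11) : Int × Int × Int) == (PySem.Int.mod (i1 - i2) 26, PySem.Int.mod (i2 - i3) 26, PySem.Int.mod (i3 - i4) 26)) = true from
        beq_iff_eq.2 (by rw [← h11.1, ← h11.2.1, ← h11.2.2])]
    exact max_abs 6 i1
  rw [if_neg h11, PySem.Dict.get?_mk_cons,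
      show (((18, 0, 11) : Int × Int × Int) == (PySem.Int.mod (i1 - i2) 26, PySem.Int.mod (i2 - i3) 26, PySem.Int.mod (i3 - i4) 26)) = false from
        beq_eq_false_iff_ne.2 (by intro he; rw [Prod.mk.injEq, Prod.mk.injEq] at he; exact h11 ⟨he.1, he.2.1, he.2.2⟩)]
  by_cases h12 : (18 : Int) = PySem.Int.mod (i1 - i2) 26 ∧ (18 : Int) = PySem.Int.mod (i2 - i3) 26 ∧ (21 : Int) = PySem.Int.mod (i3 - i4) 26
  · rw [if_pos h12, PySem.Dict.get?_mk_cons,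
      show (((18, 18, 21) : Int × Int × Int) == (PySem.Int.mod (i1 - i2) 26, PySem.Int.mod (i2 - i3) 26, PySem.Int.mod (i3 - i4) 26)) = true from
        beq_iff_eq.2 (by rw [← h12.1, ← h12.2.1, ← h12.2.2])]
    exact max_abs 12 i1
  rw [if_neg h12, PySem.Dict.get?_mk_cons,
      show (((18, 18, 21) : Int × Int × Int) == (PySem.Int.mod (i1 - i2) 26, PySem.Int.mod (i2 - i3) 26, PySem.Int.mod (i3 - i4) 26)) = false from
        beq_eq_false_iff_ne.2 (by intro he; rw [Prod.mk.injEq, Prod.mk.injEq] at he; exact h12 ⟨he.1, he.2.1, he.2.2⟩)]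
  by_cases h13 : (4 : Int) = PySem.Int.mod (i1 - i2) 26 ∧ (2 : Int) = PySem.Int.mod (i2 - i3) 26 ∧ (8 : Int) = PySem.Int.mod (i3 - i4) 26
  · rw [if_pos h13, PySem.Dict.get?_mk_cons,
      show (((4, 2, 8) : Int × Int × Int) == (PySem.Int.mod (i1 - i2) 26, PySem.Int.mod (i2 - i3) 26, PySem.Int.mod (i3 - i4) 26)) = true from
        beq_iff_eq.2 (by rw [← h13.1, ← h13.2.1, ← h13.2.2])]
    exact max_abs 18 i1
  rw [if_neg h13, PySem.Dict.get?_mk_cons,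
      show (((4, 2, 8) : Int × Int × Int) == (PySem.Int.mod (i1 - i2) 26, PySem.Int.mod (i2 - i3) 26, PySem.Int.mod (i3 - i4) 26)) = false from
        beq_eq_false_iff_ne.2 (by intro he; rw [Prod.mk.injEq, Prod.mk.injEq] at he; exact h13 ⟨he.1, he.2.1, he.2.2⟩)]
  by_cases h14 : (11 : Int) = PySem.Int.mod (i1 - i2) 26 ∧ (22 : Int) = PySem.Int.mod (i2 - i3) 26 ∧ (8 : Int) = PySem.Int.mod (i3 - i4) 26
  · rw [if_pos h14, PySem.Dict.get?_mk_cons,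
      show (((11, 22, 8) : Int × Int × Int) == (PySem.Int.mod (i1 - i2) 26, PySem.Int.mod (i2 - i3) 26, PySem.Int.mod (i3 - i4) 26)) = true from
        beq_iff_eq.2 (by rw [← h14.1, ← h14.2.1, ← h14.2.2])]
    exact max_abs 19 i1
  rw [if_neg h14, PySem.Dict.get?_mk_cons,
      show (((11, 22, 8) : Int × Int × Int) == (PySem.Int.mod (i1 - i2) 26, PySem.Int.mod (i2 - i3) 26, PySem.Int.mod (i3 - i4) 26)) = false from
        beq_eq_false_iff_ne.2 (by intro he; rw [Prod.mk.injEq, Prod.mk.injEq] at he; exact h14 ⟨he.1, he.2.1, he.2.2⟩)]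
  rfl

-- ===== VERDICT (by name: the statement is the Claim_ definition above) =====
theorem checkfour_spec : Claim_equal_checkfour := by
  intro s _ hpre
  obtain ⟨hlen, hall⟩ := hpre
  have hmem : ∀ c ∈ s.toList.take 4, c ∈ lowerA := by
    intro c hc
    have hb := List.all_eq_true.1 hall c hc
    simpa using hb
  unfold Spec_checkfour checkfour checkfour_alt
  have l0 : 0 < s.toList.length := by omega
  have l1 : 1 < s.toList.length := by omega
  have l2 : 2 < s.toList.length := by omega
  have l3 : 3 < s.toList.length := by omega
  have hg0 : PySem.Str.pyGet? s 0 = some (s.toList[0]'l0) := by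
    simp only [PySem.Str.pyGet?, PySem.Chars.pyGet?]
    rw [PySem.List.pyGet?_eq_some_getElem s.toList (by norm_num) (by exact_mod_cast l0)]
    rfl
  have hg1 : PySem.Str.pyGet? s 1 = some (s.toList[1]'l1) := by
    simp only [PySem.Str.pyGet?, PySem.Chars.pyGet?]
    rw [PySem.List.pyGet?_eq_some_getElem s.toList (by norm_num) (by exact_mod_cast l1)]
    rfl
  have hg2 : PySem.Str.pyGet? s 2 = some (s.toList[2]'l2) := by
    simp only [PySem.Str.pyGet?, PySem.Chars.pyGet?]
    rw [PySem.List.pyGet?_eq_some_getElem s.toList (by norm_num) (by exact_mod_cast l2)]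
    rfl
  have hg3 : PySem.Str.pyGet? s 3 = some (s.toList[3]'l3) := by
    simp only [PySem.Str.pyGet?, PySem.Chars.pyGet?]
    rw [PySem.List.pyGet?_eq_some_getElem s.toList (by norm_num) (by exact_mod_cast l3)]
    rfl
  have hm : ∀ (k : Nat) (hk : k < 4), s.toList[k]'(by omega) ∈ lowerA := by
    intro k hk
    apply hmem
    have : (s.toList.take 4)[k]'(by rw [List.length_take]; omega) = s.toList[k]'(by omega) :=
      List.getElem_take
    rw [← this]
    exact List.getElem_mem _
  obtain ⟨i1, hi1⟩ := Option.isSome_iff_exists.1 (lowerIdxA_isSome (hm 0 (by omega)))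
  obtain ⟨i2, hi2⟩ := Option.isSome_iff_exists.1 (lowerIdxA_isSome (hm 1 (by omega)))
  obtain ⟨i3, hi3⟩ := Option.isSome_iff_exists.1 (lowerIdxA_isSome (hm 2 (by omega)))
  obtain ⟨i4, hi4⟩ := Option.isSome_iff_exists.1 (lowerIdxA_isSome (hm 3 (by omega)))
  have hBA : lowerIdxB = lowerIdxA := rfl
  rw [hg0, hg1, hg2, hg3, hBA]
  simp only [hi1, hi2, hi3, hi4]
  obtain ⟨b1a, b1b⟩ := lowerIdxA_bounds hi1
  obtain ⟨b2a, b2b⟩ := lowerIdxA_bounds hi2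
  obtain ⟨b3a, b3b⟩ := lowerIdxA_bounds hi3
  obtain ⟨b4a, b4b⟩ := lowerIdxA_bounds hi4
  exact core_eq i1 i2 i3 i4 b1a b1b b2a b2b b3a b3b b4a b4b
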